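-- pv_equiv track=rewrite | github.com/roberto-iglesia-girbal/F1-Interactive-Predictor | backend/f1-predictor.py | _is_valid_roster
-- ===== SOURCE A (Python) =====
-- def _is_valid_roster(drivers, min_drivers=18):
--     if not isinstance(drivers, list):
--         return False
--     if len(drivers) < int(min_drivers):
--         return False
--     abbrs = []
--     for d in drivers:
--         if not isinstance(d, dict):
--             return False
--         abbr = d.get("Abbreviation")
--         if not abbr or not isinstance(abbr, str):
--             return False
--         abbrs.append(abbr)
--     return len(abbrs) == len(set(abbrs))
-- ===== SOURCE B (Python) =====
-- def _is_valid_roster(drivers, min_drivers=18):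
--     if not isinstance(drivers, list):
--         return False
--     if len(drivers) < int(min_drivers):
--         return False
--     if not all(isinstance(d, dict)
--                and isinstance(d.get("Abbreviation"), str)
--                and d.get("Abbreviation")
--                for d in drivers):
--         return False
--     abbrs = sorted(d["Abbreviation"] for d in drivers)
--     return all(x != y for x, y in zip(abbrs, abbrs[1:]))
-- ===== Notes on version B (the rewrite author's own statement) =====
-- stated objective: alternative
-- what changed: Replaced A's single accumulating loop with early returns plus the final len(abbrs)==len(set(abbrs)) cardinality test by a staged design: an all() validity pass over the entries, then sorting the abbreviations and scanning adjacent pairs for a duplicate (sort-based uniqueness instead of a set).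
import Mathlib
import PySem

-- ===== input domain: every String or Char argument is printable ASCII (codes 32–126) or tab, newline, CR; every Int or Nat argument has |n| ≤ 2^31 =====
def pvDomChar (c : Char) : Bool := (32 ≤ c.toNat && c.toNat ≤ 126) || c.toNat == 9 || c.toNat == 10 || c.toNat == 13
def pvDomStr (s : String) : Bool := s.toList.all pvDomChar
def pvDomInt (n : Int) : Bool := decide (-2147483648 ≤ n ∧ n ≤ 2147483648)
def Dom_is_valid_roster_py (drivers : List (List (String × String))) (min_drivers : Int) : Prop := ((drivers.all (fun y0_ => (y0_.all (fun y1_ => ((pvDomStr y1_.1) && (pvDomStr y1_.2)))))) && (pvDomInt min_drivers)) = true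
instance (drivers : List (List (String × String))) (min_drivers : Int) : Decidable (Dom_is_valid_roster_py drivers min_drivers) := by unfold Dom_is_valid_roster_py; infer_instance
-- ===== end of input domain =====

-- B replaces A's single accumulating loop + final set-cardinality test by a staged all()
-- validity pass followed by sorting the abbreviations and scanning adjacent pairs for a
-- duplicate (objective: alternative; sort-based uniqueness instead of a set).



-- ===== PORT A =====
-- A's loop: collect abbreviations; 'none' = an early 'return False' inside the loop
def pvCollectA : List (List (String × String)) → Option (List String)
  | [] => some []
  | d :: rest =>
    match (PySem.Dict.mk d).get? "Abbreviation" with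
    | none => none                                -- 'not abbr' (missing key → None is falsy)
    | some abbr =>
      if abbr == "" then none                     -- 'not abbr' (empty string is falsy)
      else (pvCollectA rest).map (abbr :: ·)      -- abbrs.append(abbr)

def is_valid_roster_py (drivers : List (List (String × String))) (min_drivers : Int) : Bool :=
  if (drivers.length : Int) < min_drivers then false
  else
    match pvCollectA drivers with
    | none => false
    | some abbrs => decide (abbrs.length = (PySem.Set.ofList abbrs).length)

-- ===== PORT B =====
-- the per-entry predicate of B's all(): d.get("Abbreviation") is a non-empty string
def pvValidB (d : List (String × String)) : Bool :=
  match (PySem.Dict.mk d).get? "Abbreviation" with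
  | none => false
  | some abbr => !(abbr == "")

-- d["Abbreviation"]; only evaluated after the validity pass, where the key is present,
-- so the KeyError branch (getD default) is unreachable
def pvAbbr (d : List (String × String)) : String :=
  ((PySem.Dict.mk d).get? "Abbreviation").getD ""

def is_valid_roster_py_alt (drivers : List (List (String × String))) (min_drivers : Int) : Bool :=
  if (drivers.length : Int) < min_drivers then false
  else if !(drivers.all pvValidB) then false
  else
    let abbrs := PySem.List.sorted (drivers.map pvAbbr) (fun x => x) false
    (abbrs.zip abbrs.tail).all (fun p => !(p.1 == p.2))

-- ===== PRECONDITION & SPEC =====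
def Spec_is_valid_roster_py (drivers : List (List (String × String))) (min_drivers : Int) (out : Bool) : Prop := out = is_valid_roster_py_alt drivers min_drivers
instance (drivers : List (List (String × String))) (min_drivers : Int) (out : Bool) : Decidable (Spec_is_valid_roster_py drivers min_drivers out) := by unfold Spec_is_valid_roster_py; infer_instance

-- ===== CLAIM (what is proved, stated in full; the proofs are below) =====
def Claim_equal_is_valid_roster_py : Prop := ∀ (drivers : List (List (String × String))) (min_drivers : Int), Dom_is_valid_roster_py drivers min_drivers → Spec_is_valid_roster_py drivers min_drivers (is_valid_roster_py drivers min_drivers)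

-- ===== LEMMAS AND PROOFS =====

-- each Set.add grows the set by at most one element
theorem pv_foldl_add_len_le (xs : List String) (s : PySem.Set String) :
    (xs.foldl PySem.Set.add s).length ≤ s.length + xs.length := by
  induction xs generalizing s with
  | nil => simp
  | cons a rest ih =>
    simp only [List.foldl_cons]
    refine le_trans (ih _) ?_
    by_cases h : a ∈ s <;> simp [PySem.Set.add, h] <;> try omega

-- A's final cardinality test, relativised to an accumulating seed set
theorem pv_foldl_add_len_iff (xs : List String) (s : PySem.Set String) (hs : s.Nodup) :
    ((xs.foldl PySem.Set.add s).length = s.length + xs.length) ↔ (s ++ xs).Nodup := by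
  induction xs generalizing s with
  | nil => simpa using hs
  | cons a rest ih =>
    simp only [List.foldl_cons]
    by_cases h : a ∈ s
    · have hadd : (PySem.Set.add s a) = s := by simp [PySem.Set.add, h]
      have hle := pv_foldl_add_len_le rest (PySem.Set.add s a)
      rw [hadd] at hle ⊢
      constructor
      · intro hlen; exfalso; simp only [List.length_cons] at hlen; omega
      · intro hnd; exfalso
        have hdj := (List.nodup_append.mp hnd).2.2
        exact hdj a h a List.mem_cons_self rfl
    · have hadd : (PySem.Set.add s a) = s ++ [a] := by simp [PySem.Set.add, h]
      have hs' : (s ++ [a]).Nodup := by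
        rw [List.nodup_append]
        refine ⟨hs, List.nodup_singleton a, ?_⟩
        intro x hx y hy hxy
        apply h
        rwa [hxy, List.mem_singleton.mp hy] at hx
      have hiff := ih (s ++ [a]) hs'
      rw [hadd]
      have hlen : List.length s + (a :: rest).length = (s ++ [a]).length + rest.length := by
        simp only [List.length_append, List.length_cons, List.length_nil]
        omega
      rw [hlen, hiff]
      constructor
      · intro hnd; simpa using hnd
      · intro hnd; simpa using hnd

theorem pv_card_iff_nodup (xs : List String) :
    (xs.length = (PySem.Set.ofList xs).length) ↔ xs.Nodup := by
  rw [PySem.Set.ofList_eq_foldl]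
  have := pv_foldl_add_len_iff xs ([] : PySem.Set String) (by simp)
  simp only [List.nil_append, List.length_nil, Nat.zero_add] at this
  rw [← this]
  exact eq_comm

-- A's loop = B's staged validity pass followed by the map d["Abbreviation"]
theorem pv_collectA_eq (xs : List (List (String × String))) :
    pvCollectA xs = if xs.all pvValidB then some (xs.map pvAbbr) else none := by
  induction xs with
  | nil => simp [pvCollectA]
  | cons d rest ih =>
    simp only [pvCollectA, List.all_cons, List.map_cons]
    cases hget : (PySem.Dict.mk d).get? "Abbreviation" with
    | none => simp [pvValidB, hget]
    | some abbr =>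
      by_cases he : (abbr == "") = true
      · simp [pvValidB, hget, he]
      · have hv : pvValidB d = true := by simp [pvValidB, hget, he]
        have ha : pvAbbr d = abbr := by simp [pvAbbr, hget]
        rw [ih]
        by_cases hr : rest.all pvValidB = true <;>
          simp [he, hv, ha, hr]

-- on a ≤-sorted list, "no two adjacent elements equal" is exactly Nodup
theorem pv_adj_iff_nodup (l : List String) (h : l.Pairwise (fun a b => a ≤ b)) :
    ((l.zip l.tail).all (fun p => !(p.1 == p.2)) = true) ↔ l.Nodup := by
  induction l with
  | nil => simp
  | cons a t ih =>
    cases t with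
    | nil => simp
    | cons b t' =>
      have hpt : (b :: t').Pairwise (fun x y => x ≤ y) := (List.pairwise_cons.mp h).2
      have hab : a ≤ b := (List.pairwise_cons.mp h).1 b List.mem_cons_self
      have hrest := ih hpt
      simp only [List.tail_cons, List.zip_cons_cons, List.all_cons, Bool.and_eq_true,
        Bool.not_eq_true', beq_eq_false_iff_ne, ne_eq] at hrest ⊢
      constructor
      · rintro ⟨hne, hadj⟩
        have hnd' := hrest.mp hadj
        refine List.nodup_cons.mpr ⟨?_, hnd'⟩
        intro hmem
        rcases List.mem_cons.mp hmem with hb | ht'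
        · exact hne hb
        · -- a ≤ b ≤ a forces a = b
          have hba : b ≤ a := by
            have := (List.pairwise_cons.mp hpt).1 a ht'
            exact this
          exact hne (le_antisymm hab hba)
      · intro hnd
        have hc := List.nodup_cons.mp hnd
        exact ⟨fun hb => hc.1 (hb ▸ List.mem_cons_self), hrest.mpr hc.2⟩

-- ===== VERDICT (by name: the statement is the Claim_ definition above) =====
theorem is_valid_roster_py_spec : Claim_equal_is_valid_roster_py := by
  intro drivers min_drivers _
  unfold Spec_is_valid_roster_py is_valid_roster_py is_valid_roster_py_alt
  by_cases hlt : (drivers.length : Int) < min_drivers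
  · simp [hlt]
  · simp only [hlt, if_false]
    rw [pv_collectA_eq]
    by_cases hv : drivers.all pvValidB = true
    · simp only [hv, if_true, Bool.not_true, Bool.false_eq_true, if_false]
      set ab := drivers.map pvAbbr with hab
      set l := PySem.List.sorted ab (fun x => x) false with hl
      have hperm : l.Perm ab := PySem.List.sorted_perm ab (fun x => x) false
      have hpw : l.Pairwise (fun a b => a ≤ b) := by
        have := PySem.List.sorted_pairwise (xs := ab) (key := fun x => x)
        simpa using this
      have hB := pv_adj_iff_nodup l hpw
      have hnd : l.Nodup ↔ ab.Nodup := hperm.nodup_iff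
      rw [Bool.eq_iff_iff, decide_eq_true_iff, pv_card_iff_nodup, ← hnd, ← hB]
    · simp [hv]
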